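-- pv_equiv track=rewrite | github.com/Nebsorg/AdventOfCode | 2023/tools.py | split_interval_with_interval
-- ===== SOURCE A (Python) =====
-- def interval_intersection(i1,i2):
--     xmin = min(i1[0],i1[1])
--     xmax = max(i1[0],i1[1])
--     ymin = min(i2[0],i2[1])
--     ymax = max(i2[0],i2[1])
--
--     if (ymin > xmax) or (xmin > ymax):
--         return([])
--
--     imin = max(xmin, ymin)
--     imax = min(xmax, ymax)
--     return([imin, imax])
--
-- def split_interval_with_interval(i1,i2):
--     result = []
--     intersection = interval_intersection(i1,i2)
--     if len(intersection) == 0: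
--         result.append(i1)
--         return(result)
--
--     values = []
--     val_min = min(i1)
--     val_max = max(i1)
--
--     if intersection[0] > val_min:
--         values.extend([val_min, intersection[0]-1, intersection[0]])
--     else:
--         values.append(intersection[0])
--
--     if intersection[1] < val_max:
--         values.extend([val_max, intersection[1]+1, intersection[1]])
--     else:
--         values.append(intersection[1])
--
--     values = sorted(values)
--     for i in range(0, len(values), 2):
--         result.append([values[i], values[i+1]])
--     return(result)
-- ===== SOURCE B (Python) =====
-- def split_interval_with_interval(i1, i2):
--     lo = max(min(i1[0], i1[1]), min(i2[0], i2[1]))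
--     hi = min(max(i1[0], i1[1]), max(i2[0], i2[1]))
--     if lo > hi:
--         return [i1]
--     val_min = min(i1)
--     val_max = max(i1)
--     result = []
--     if lo > val_min:
--         result.append([val_min, lo - 1])
--     result.append([lo, hi])
--     if hi < val_max:
--         result.append([hi + 1, val_max])
--     return result
-- ===== Notes on version B (the rewrite author's own statement) =====
-- stated objective: simpler
-- what changed: Replaces A's collect-boundary-values / sort / chunk-into-pairs construction with direct piecewise construction of the up-to-three result intervals (left remainder, intersection, right remainder), with the intersection inlined.
import Mathlib
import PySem

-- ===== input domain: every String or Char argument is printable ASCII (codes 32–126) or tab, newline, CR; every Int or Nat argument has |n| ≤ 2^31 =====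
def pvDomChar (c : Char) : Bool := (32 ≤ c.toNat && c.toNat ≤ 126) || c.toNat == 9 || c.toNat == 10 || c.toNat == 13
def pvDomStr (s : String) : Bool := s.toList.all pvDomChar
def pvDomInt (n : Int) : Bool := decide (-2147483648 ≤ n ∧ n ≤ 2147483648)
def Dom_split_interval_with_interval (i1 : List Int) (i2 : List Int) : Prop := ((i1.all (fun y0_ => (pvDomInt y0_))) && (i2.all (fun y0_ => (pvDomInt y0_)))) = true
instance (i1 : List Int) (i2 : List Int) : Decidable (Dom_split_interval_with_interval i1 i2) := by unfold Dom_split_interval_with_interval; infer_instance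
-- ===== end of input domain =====

-- B replaces A's collect-boundaries / sort / chunk-into-pairs construction by direct
-- piecewise construction of the up-to-three result intervals (return value only; no side effects).
-- ===== PORT A =====
-- the 'for i in range(0, len(values), 2): result.append([values[i], values[i+1]])' loop of A
def pvChunk (values : List Int) : List (List Int) :=
  (PySem.List.pyRange 0 (values.length : Int) 2).foldl (fun result i =>
    match PySem.List.pyGet? values i, PySem.List.pyGet? values (i + 1) with
    | some u, some v => result ++ [[u, v]]
    | _, _ => result) []  -- index error unreachable: len(values) is even

def interval_intersection (i1 : List Int) (i2 : List Int) : List Int :=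
  match PySem.List.pyGet? i1 0, PySem.List.pyGet? i1 1,
        PySem.List.pyGet? i2 0, PySem.List.pyGet? i2 1 with
  | some a, some b, some c, some d =>
    let xmin := min a b
    let xmax := max a b
    let ymin := min c d
    let ymax := max c d
    if ymin > xmax ∨ xmin > ymax then []
    else [max xmin ymin, min xmax ymax]
  | _, _, _, _ => []  -- IndexError in Python; excluded by Pre_

def split_interval_with_interval (i1 : List Int) (i2 : List Int) : List (List Int) :=
  let intersection := interval_intersection i1 i2
  if intersection.length = 0 then [i1]
  else
    match PySem.List.pyGet? intersection 0, PySem.List.pyGet? intersection 1,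
          PySem.List.min? i1 (fun x => x), PySem.List.max? i1 (fun x => x) with
    | some it0, some it1, some val_min, some val_max =>
      let values₀ := (if it0 > val_min then [val_min, it0 - 1, it0] else [it0])
                     ++ (if it1 < val_max then [val_max, it1 + 1, it1] else [it1])
      pvChunk (PySem.List.sorted values₀ (fun x => x) false)
    | _, _, _, _ => []  -- min/max of empty list; excluded by Pre_

-- ===== PORT B =====
def split_interval_with_interval_alt (i1 : List Int) (i2 : List Int) : List (List Int) :=
  match PySem.List.pyGet? i1 0, PySem.List.pyGet? i1 1,
        PySem.List.pyGet? i2 0, PySem.List.pyGet? i2 1 with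
  | some a, some b, some c, some d =>
    let lo := max (min a b) (min c d)
    let hi := min (max a b) (max c d)
    if lo > hi then [i1]
    else
      match PySem.List.min? i1 (fun x => x), PySem.List.max? i1 (fun x => x) with
      | some val_min, some val_max =>
        (if lo > val_min then [[val_min, lo - 1]] else [])
          ++ [[lo, hi]]
          ++ (if hi < val_max then [[hi + 1, val_max]] else [])
      | _, _ => []
  | _, _, _, _ => []  -- IndexError in Python; excluded by Pre_

-- ===== PRECONDITION & SPEC =====
-- Pre_: both Pythons index i1[0], i1[1], i2[0], i2[1] and so raise IndexError on shorter lists.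
def Pre_split_interval_with_interval (i1 : List Int) (i2 : List Int) : Prop :=
  2 ≤ i1.length ∧ 2 ≤ i2.length
instance (i1 : List Int) (i2 : List Int) : Decidable (Pre_split_interval_with_interval i1 i2) := by
  unfold Pre_split_interval_with_interval; infer_instance
def pvWitness_split_interval_with_interval : List Int × List Int := ([1, 9], [3, 5])

def Spec_split_interval_with_interval (i1 : List Int) (i2 : List Int) (out : List (List Int)) : Prop := out = split_interval_with_interval_alt i1 i2
instance (i1 : List Int) (i2 : List Int) (out : List (List Int)) : Decidable (Spec_split_interval_with_interval i1 i2 out) := by unfold Spec_split_interval_with_interval; infer_instance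

-- ===== CLAIM (what is proved, stated in full; the proofs are below) =====
def Claim_equal_split_interval_with_interval : Prop := ∀ (i1 : List Int) (i2 : List Int), Dom_split_interval_with_interval i1 i2 → Pre_split_interval_with_interval i1 i2 → Spec_split_interval_with_interval i1 i2 (split_interval_with_interval i1 i2)

-- ===== LEMMAS AND PROOFS =====

lemma pv_lohi (a b c d : Int) :
    max (min a b) (min c d) > min (max a b) (max c d) ↔ (min c d > max a b ∨ min a b > max c d) := by
  simp only [min_def, max_def]; split_ifs <;> omega

lemma pv_get1 (x y : Int) (t : List Int) : PySem.List.pyGet? (x :: y :: t) 1 = some y := by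
  have h : (1 : Int) = ((1 : Nat) : Int) := rfl
  rw [h, PySem.List.pyGet?_natCast]; rfl

lemma pvChunk2 (u v : Int) : pvChunk [u, v] = [[u, v]] := by
  have h : PySem.List.pyRange 0 (2 : Int) 2 = [0] := by decide
  norm_num [pvChunk, h, List.foldl, PySem.List.pyGet?, PySem.List.pyIdx?]

lemma pvChunk4 (u v w x : Int) : pvChunk [u, v, w, x] = [[u, v], [w, x]] := by
  have h : PySem.List.pyRange 0 (4 : Int) 2 = [0, 2] := by decide
  norm_num [pvChunk, h, List.foldl, PySem.List.pyGet?, PySem.List.pyIdx?,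
    show Int.toNat 2 = 2 from rfl, show Int.toNat 3 = 3 from rfl]

lemma pvChunk6 (u v w x y z : Int) : pvChunk [u, v, w, x, y, z] = [[u, v], [w, x], [y, z]] := by
  have h : PySem.List.pyRange 0 (6 : Int) 2 = [0, 2, 4] := by decide
  norm_num [pvChunk, h, List.foldl, PySem.List.pyGet?, PySem.List.pyIdx?,
    show Int.toNat 2 = 2 from rfl, show Int.toNat 3 = 3 from rfl,
    show Int.toNat 4 = 4 from rfl, show Int.toNat 5 = 5 from rfl]

lemma pv_perm3 (p q r : Int) : ([r, q, p] : List Int).Perm [p, q, r] := by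
  simpa using List.reverse_perm [p, q, r]

-- ===== VERDICT (by name: the statement is the Claim_ definition above) =====
theorem split_interval_with_interval_spec : Claim_equal_split_interval_with_interval := by
  intro i1 i2 _ hPre
  obtain ⟨h1, h2⟩ := hPre
  obtain ⟨a, b, t1, rfl⟩ : ∃ a b t, i1 = a :: b :: t := by
    rcases i1 with _ | ⟨a, _ | ⟨b, t⟩⟩
    · simp at h1
    · simp at h1
    · exact ⟨a, b, t, rfl⟩
  obtain ⟨c, d, t2, rfl⟩ : ∃ c d t, i2 = c :: d :: t := by
    rcases i2 with _ | ⟨c, _ | ⟨d, t⟩⟩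
    · simp at h2
    · simp at h2
    · exact ⟨c, d, t, rfl⟩
  unfold Spec_split_interval_with_interval split_interval_with_interval
    split_interval_with_interval_alt interval_intersection
  have hmin : PySem.List.min? (a :: b :: t1) (fun x => x) = some ((b :: t1).foldl min a) :=
    PySem.List.min?_id_cons ..
  have hmax : PySem.List.max? (a :: b :: t1) (fun x => x) = some ((b :: t1).foldl max a) :=
    PySem.List.max?_id_cons ..
  set vmin := (b :: t1).foldl min a with hv1
  set vmax := (b :: t1).foldl max a with hv2
  have hva : vmin ≤ a := PySem.List.min?_isMin hmin a (by simp)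
  have hvb : vmin ≤ b := PySem.List.min?_isMin hmin b (by simp)
  have hwa : a ≤ vmax := PySem.List.max?_isMax hmax a (by simp)
  have hwb : b ≤ vmax := PySem.List.max?_isMax hmax b (by simp)
  simp only [PySem.List.pyGet?_zero_cons, pv_get1, hmin, hmax]
  by_cases hE : min c d > max a b ∨ min a b > max c d
  · rw [if_pos hE, if_pos ((pv_lohi a b c d).mpr hE)]
    simp
  · rw [if_neg hE, if_neg (fun h => hE ((pv_lohi a b c d).mp h))]
    simp only [List.length_cons, List.length_nil, Nat.succ_ne_zero, if_false,
      PySem.List.pyGet?_zero_cons, pv_get1]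
    set lo := max (min a b) (min c d) with hlo
    set hi := min (max a b) (max c d) with hhi
    have hvlo : vmin ≤ lo := le_trans (le_min hva hvb) (le_max_left _ _)
    have hhiv : hi ≤ vmax := le_trans (min_le_left _ _) (max_le hwa hwb)
    have hlohi : lo ≤ hi := by rw [hlo, hhi]; simp only [min_def, max_def] at *; split_ifs <;> omega
    by_cases hL : lo > vmin <;> by_cases hR : hi < vmax
    · rw [if_pos hL, if_pos hR]
      rw [show PySem.List.sorted ([vmin, lo - 1, lo] ++ [vmax, hi + 1, hi]) (fun x => x) false
            = [vmin, lo - 1, lo, hi, hi + 1, vmax] from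
          PySem.List.sorted_id_eq_of_perm_of_pairwise _ _
            (List.Perm.cons _ (List.Perm.cons _ (List.Perm.cons _ (pv_perm3 _ _ _))))
            (by simp [List.pairwise_cons]; omega)]
      rw [pvChunk6]
      simp [hL, hR]
    · rw [if_pos hL, if_neg hR]
      rw [show PySem.List.sorted ([vmin, lo - 1, lo] ++ [hi]) (fun x => x) false
            = [vmin, lo - 1, lo, hi] from
          PySem.List.sorted_eq_self_of_pairwise _ _ (by simp [List.pairwise_cons]; omega)]
      rw [pvChunk4]
      simp [hL, hR]
    · rw [if_neg hL, if_pos hR]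
      rw [show PySem.List.sorted ([lo] ++ [vmax, hi + 1, hi]) (fun x => x) false
            = [lo, hi, hi + 1, vmax] from
          PySem.List.sorted_id_eq_of_perm_of_pairwise _ _
            (List.Perm.cons _ (pv_perm3 _ _ _))
            (by simp [List.pairwise_cons]; omega)]
      rw [pvChunk4]
      simp [hL, hR]
    · rw [if_neg hL, if_neg hR]
      rw [show PySem.List.sorted ([lo] ++ [hi]) (fun x => x) false = [lo, hi] from
          PySem.List.sorted_eq_self_of_pairwise _ _ (by simp [List.pairwise_cons]; omega)]
      rw [pvChunk2]
      simp [hL, hR]
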